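-- pv_equiv track=rewrite | github.com/oleguer12345/dissertation_firefighter_game | lp_formulation.py | transofrm_dict_int
-- ===== SOURCE A (Python) =====
-- def transofrm_dict_int(original_dict,node_to_assign_1):
--     # Create a mapping between coordinates and unique integers
--     coord_to_int = {}
--     next_int = 1
--
--     new_dict = {}
--
--     for key, value in original_dict.items():
--         # Process key
--         if key not in coord_to_int:
--             coord_to_int[key] = next_int
--             next_int += 1
--         new_key = coord_to_int[key]
--
--         # Process values
--         new_values = []
--         for coord_pair in value:
--             if coord_pair not in coord_to_int:
--                 coord_to_int[coord_pair] = next_int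
--                 next_int += 1
--             new_values.append(coord_to_int[coord_pair])
--
--         new_dict[new_key] = new_values
--
--     # Assign value 1 to the specified node
--     if node_to_assign_1 in coord_to_int:
--         node_value_1 = coord_to_int[node_to_assign_1]
--         new_dict[node_value_1] = [1]
--
--     return new_dict
-- ===== SOURCE B (Python) =====
-- def transofrm_dict_int(original_dict, node_to_assign_1):
--     # Flatten all coordinates into one stream in encounter order (key, then its
--     # values, per entry), dedupe keeping first occurrences, and label each
--     # coordinate by its position in the deduplicated list: no conditional
--     # insertion, no running counter.
--     stream = []
--     for key, value in original_dict.items():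
--         stream.append(key)
--         stream.extend(value)
--     coord_to_int = {c: i for i, c in enumerate(dict.fromkeys(stream), start=1)}
--     new_dict = {coord_to_int[k]: [coord_to_int[c] for c in v]
--                 for k, v in original_dict.items()}
--     if node_to_assign_1 in coord_to_int:
--         new_dict[coord_to_int[node_to_assign_1]] = [1]
--     return new_dict
-- ===== Notes on version B (the rewrite author's own statement) =====
-- stated objective: alternative
-- what changed: Replaces A's single interleaved pass that threads a label table, an explicit next_int counter and the output dict together by a flatten/dedup/enumerate pipeline: all coordinates are flattened into one stream, dict.fromkeys dedups it keeping first occurrences, positions in that deduplicated list are the labels, and the output dict is then built by pure lookups.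
import Mathlib
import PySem

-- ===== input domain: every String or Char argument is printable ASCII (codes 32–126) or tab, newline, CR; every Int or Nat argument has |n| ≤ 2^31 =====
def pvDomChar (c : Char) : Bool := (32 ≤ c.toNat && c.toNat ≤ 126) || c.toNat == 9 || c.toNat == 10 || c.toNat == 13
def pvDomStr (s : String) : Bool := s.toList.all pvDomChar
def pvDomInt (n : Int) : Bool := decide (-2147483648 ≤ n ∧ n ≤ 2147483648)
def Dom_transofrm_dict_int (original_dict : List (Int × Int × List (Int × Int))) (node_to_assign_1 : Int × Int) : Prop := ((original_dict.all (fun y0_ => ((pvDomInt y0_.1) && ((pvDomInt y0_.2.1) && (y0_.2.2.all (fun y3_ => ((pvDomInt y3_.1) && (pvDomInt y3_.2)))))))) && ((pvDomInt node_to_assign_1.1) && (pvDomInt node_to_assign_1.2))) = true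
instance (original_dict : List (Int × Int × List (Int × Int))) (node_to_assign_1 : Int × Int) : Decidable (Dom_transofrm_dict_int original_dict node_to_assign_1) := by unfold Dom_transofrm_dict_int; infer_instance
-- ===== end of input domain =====

-- B replaces A's single interleaved pass (label table + explicit counter + output dict threaded
-- together) by a flatten / dedup / enumerate pipeline followed by a pure-lookup construction pass.

-- ===== PORT A =====
-- inner loop over one value list: state (coord_to_int, next_int, new_values)
def aInner (st : PySem.Dict (Int × Int) Int × Int × List Int) (c : Int × Int) :
    PySem.Dict (Int × Int) Int × Int × List Int :=
  let mn := if st.1.contains c then (st.1, st.2.1) else (st.1.insert c st.2.1, st.2.1 + 1)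
  (mn.1, mn.2, st.2.2 ++ [mn.1.getD c 0])

-- one iteration of A's outer loop: state (coord_to_int, next_int, new_dict)
def aStep (st : PySem.Dict (Int × Int) Int × Int × PySem.Dict Int (List Int))
    (kv : Int × Int × List (Int × Int)) :
    PySem.Dict (Int × Int) Int × Int × PySem.Dict Int (List Int) :=
  let mn := if st.1.contains (kv.1, kv.2.1) then (st.1, st.2.1)
            else (st.1.insert (kv.1, kv.2.1) st.2.1, st.2.1 + 1)
  let newKey := mn.1.getD (kv.1, kv.2.1) 0
  let r := kv.2.2.foldl aInner (mn.1, mn.2, [])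
  (r.1, r.2.1, st.2.2.insert newKey r.2.2)

def transofrm_dict_int (original_dict : List (Int × Int × List (Int × Int))) (node_to_assign_1 : Int × Int) : List (Int × List Int) :=
  let r := original_dict.foldl aStep (PySem.Dict.empty, 1, PySem.Dict.empty)
  let nd := if r.1.contains node_to_assign_1
            then r.2.2.insert (r.1.getD node_to_assign_1 0) [1]
            else r.2.2
  nd.items

-- ===== PORT B =====
def transofrm_dict_int_alt (original_dict : List (Int × Int × List (Int × Int))) (node_to_assign_1 : Int × Int) : List (Int × List Int) :=
  -- stream: append the key, then extend with the value list, per entry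
  let stream := original_dict.foldl (fun s kv => s ++ (kv.1, kv.2.1) :: kv.2.2) []
  -- {c: i for i, c in enumerate(dict.fromkeys(stream), start=1)}
  let m := (PySem.List.enumerate (PySem.List.dedup stream) 1).foldl
      (fun d p => d.insert p.2 p.1) (PySem.Dict.empty : PySem.Dict (Int × Int) Int)
  let nd := original_dict.foldl
      (fun nd kv => nd.insert (m.getD (kv.1, kv.2.1) 0) (kv.2.2.map (fun c => m.getD c 0)))
      (PySem.Dict.empty : PySem.Dict Int (List Int))
  let nd := if m.contains node_to_assign_1
            then nd.insert (m.getD node_to_assign_1 0) [1]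
            else nd
  nd.items

-- ===== PRECONDITION & SPEC =====
def Spec_transofrm_dict_int (original_dict : List (Int × Int × List (Int × Int))) (node_to_assign_1 : Int × Int) (out : List (Int × List Int)) : Prop := out = transofrm_dict_int_alt original_dict node_to_assign_1
instance (original_dict : List (Int × Int × List (Int × Int))) (node_to_assign_1 : Int × Int) (out : List (Int × List Int)) : Decidable (Spec_transofrm_dict_int original_dict node_to_assign_1 out) := by unfold Spec_transofrm_dict_int; infer_instance

-- ===== CLAIM =====
def Claim_equal_transofrm_dict_int : Prop := ∀ (original_dict : List (Int × Int × List (Int × Int))) (node_to_assign_1 : Int × Int), Dom_transofrm_dict_int original_dict node_to_assign_1 → Spec_transofrm_dict_int original_dict node_to_assign_1 (transofrm_dict_int original_dict node_to_assign_1)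

-- ===== LEMMAS AND PROOFS =====

-- proof-side helpers: the canonical first-encounter labeling fold
def bMark (m : PySem.Dict (Int × Int) Int) (c : Int × Int) : PySem.Dict (Int × Int) Int :=
  if m.contains c then m else m.insert c ((m.size : Int) + 1)

def bStep (m : PySem.Dict (Int × Int) Int) (kv : Int × Int × List (Int × Int)) :
    PySem.Dict (Int × Int) Int :=
  kv.2.2.foldl bMark (bMark m (kv.1, kv.2.1))

theorem bMark_get?_mono {m : PySem.Dict (Int × Int) Int} {k : Int × Int} {v : Int}
    (c : Int × Int) (h : m.get? k = some v) : (bMark m c).get? k = some v := by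
  unfold bMark
  split_ifs with hc
  · exact h
  · rcases eq_or_ne k c with rfl | hne
    · rw [(PySem.Dict.get?_eq_none_iff_contains _ _).mpr (by simpa using hc)] at h
      exact absurd h (by simp)
    · rw [PySem.Dict.get?_insert_of_ne m _ hne]; exact h

theorem foldl_bMark_get?_mono {m : PySem.Dict (Int × Int) Int} {k : Int × Int} {v : Int}
    (l : List (Int × Int)) (h : m.get? k = some v) :
    (l.foldl bMark m).get? k = some v := by
  induction l generalizing m with
  | nil => exact h
  | cons c l ih => exact ih (bMark_get?_mono c h)

theorem foldl_bStep_get?_mono {m : PySem.Dict (Int × Int) Int} {k : Int × Int} {v : Int}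
    (l : List (Int × Int × List (Int × Int))) (h : m.get? k = some v) :
    (l.foldl bStep m).get? k = some v := by
  induction l generalizing m with
  | nil => exact h
  | cons kv l ih => exact ih (foldl_bMark_get?_mono _ (bMark_get?_mono _ h))

theorem getD_stable_foldl_bMark {m : PySem.Dict (Int × Int) Int} {k : Int × Int}
    (l : List (Int × Int)) (h : m.contains k = true) :
    (l.foldl bMark m).getD k 0 = m.getD k 0 := by
  have hiff := PySem.Dict.get?_eq_none_iff_contains m k
  cases hg : m.get? k with
  | none => rw [hg] at hiff; simp [h] at hiff
  | some v =>
    rw [PySem.Dict.getD_of_get?_eq_some m 0 hg,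
        PySem.Dict.getD_of_get?_eq_some _ 0 (foldl_bMark_get?_mono l hg)]

theorem getD_stable_foldl_bStep {m : PySem.Dict (Int × Int) Int} {k : Int × Int}
    (l : List (Int × Int × List (Int × Int))) (h : m.contains k = true) :
    (l.foldl bStep m).getD k 0 = m.getD k 0 := by
  have hiff := PySem.Dict.get?_eq_none_iff_contains m k
  cases hg : m.get? k with
  | none => rw [hg] at hiff; simp [h] at hiff
  | some v =>
    rw [PySem.Dict.getD_of_get?_eq_some m 0 hg,
        PySem.Dict.getD_of_get?_eq_some _ 0 (foldl_bStep_get?_mono l hg)]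

theorem bMark_contains_self (m : PySem.Dict (Int × Int) Int) (c : Int × Int) :
    (bMark m c).contains c = true := by
  unfold bMark; split_ifs with hc
  · exact hc
  · exact PySem.Dict.contains_insert_self _ _ _

theorem bMark_contains_mono {m : PySem.Dict (Int × Int) Int} {k : Int × Int}
    (c : Int × Int) (h : m.contains k = true) : (bMark m c).contains k = true := by
  unfold bMark; split_ifs with hc
  · exact h
  · rw [PySem.Dict.contains_insert]; simp [h]

theorem foldl_bMark_contains_mono {m : PySem.Dict (Int × Int) Int} {k : Int × Int}
    (l : List (Int × Int)) (h : m.contains k = true) :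
    (l.foldl bMark m).contains k = true := by
  induction l generalizing m with
  | nil => exact h
  | cons c l ih => exact ih (bMark_contains_mono c h)

theorem foldl_bMark_contains_mem {m : PySem.Dict (Int × Int) Int} {c : Int × Int}
    (l : List (Int × Int)) (hc : c ∈ l) : (l.foldl bMark m).contains c = true := by
  induction l generalizing m with
  | nil => cases hc
  | cons x l ih =>
    rcases List.mem_cons.mp hc with rfl | hc'
    · exact foldl_bMark_contains_mono l (bMark_contains_self m c)
    · exact ih hc'

-- A's "if key not in …: assign next_int" step, with next_int = size+1, IS bMark
theorem aAssign_eq_bMark (m : PySem.Dict (Int × Int) Int) (c : Int × Int) :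
    (if m.contains c then (m, (m.size : Int) + 1) else (m.insert c ((m.size : Int) + 1), (m.size : Int) + 1 + 1)) =
      ((bMark m c : PySem.Dict (Int × Int) Int), ((bMark m c).size : Int) + 1) := by
  unfold bMark
  split_ifs with hc
  · rfl
  · simp [PySem.Dict.size_insert, hc]

-- A's inner loop, started with next_int = size+1, equals the bMark labeling of the list
-- followed by lookups in the resulting table.
theorem inner_eq (l : List (Int × Int)) (m : PySem.Dict (Int × Int) Int) (acc : List Int) :
    l.foldl aInner (m, (m.size : Int) + 1, acc) =
      ((l.foldl bMark m : PySem.Dict (Int × Int) Int),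
        ((l.foldl bMark m).size : Int) + 1,
        acc ++ l.map (fun c => (l.foldl bMark m).getD c 0)) := by
  induction l generalizing m acc with
  | nil => simp
  | cons c l ih =>
    have hstep : aInner (m, (m.size : Int) + 1, acc) c =
        ((bMark m c : PySem.Dict (Int × Int) Int), ((bMark m c).size : Int) + 1,
          acc ++ [(bMark m c).getD c 0]) := by
      unfold aInner
      simp only []
      rw [show (if m.contains c then (m, (m.size : Int)+1) else (m.insert c ((m.size : Int)+1), (m.size : Int)+1+1)) = ((bMark m c : PySem.Dict (Int × Int) Int), ((bMark m c).size : Int) + 1) from aAssign_eq_bMark m c]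
    have hx : (bMark m c).getD c 0 = (l.foldl bMark (bMark m c)).getD c 0 := by
      rw [getD_stable_foldl_bMark l (bMark_contains_self m c)]
    simp only [List.foldl_cons, hstep, ih, List.map_cons]
    simp [hx]

-- main invariant: A's fold from (m, m.size+1, nd) equals the bMark labeling continuation plus
-- the pure-lookup construction pass (lookups in the FINAL table, by stability).
theorem main_eq (od : List (Int × Int × List (Int × Int)))
    (m : PySem.Dict (Int × Int) Int) (nd : PySem.Dict Int (List Int)) :
    od.foldl aStep (m, (m.size : Int) + 1, nd) =
      ((od.foldl bStep m : PySem.Dict (Int × Int) Int),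
        ((od.foldl bStep m).size : Int) + 1,
        od.foldl (fun nd kv =>
          nd.insert ((od.foldl bStep m).getD (kv.1, kv.2.1) 0)
            (kv.2.2.map (fun c => (od.foldl bStep m).getD c 0))) nd) := by
  induction od generalizing m nd with
  | nil => simp
  | cons kv od ih =>
    have hstep : aStep (m, (m.size : Int) + 1, nd) kv =
        ((bStep m kv : PySem.Dict (Int × Int) Int), ((bStep m kv).size : Int) + 1,
          nd.insert ((bStep m kv).getD (kv.1, kv.2.1) 0)
            (kv.2.2.map (fun c => (bStep m kv).getD c 0))) := by
      unfold aStep bStep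
      simp only []
      rw [show (if m.contains (kv.1, kv.2.1) then (m, (m.size : Int)+1) else (m.insert (kv.1, kv.2.1) ((m.size : Int)+1), (m.size : Int)+1+1)) = ((bMark m (kv.1, kv.2.1) : PySem.Dict (Int × Int) Int), ((bMark m (kv.1, kv.2.1)).size : Int) + 1) from aAssign_eq_bMark m (kv.1, kv.2.1)]
      rw [inner_eq]
      rw [getD_stable_foldl_bMark kv.2.2 (bMark_contains_self m (kv.1, kv.2.1))]
      simp
    simp only [List.foldl_cons]
    rw [hstep, ih]
    have hM : ∀ k, (bStep m kv).contains k = true →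
        ((od.foldl bStep (bStep m kv)).getD k 0) = (bStep m kv).getD k 0 :=
      fun k hk => getD_stable_foldl_bStep od hk
    have hkeyc : (bStep m kv).contains (kv.1, kv.2.1) = true := by
      unfold bStep
      exact foldl_bMark_contains_mono _ (bMark_contains_self m (kv.1, kv.2.1))
    have hmapc : kv.2.2.map (fun c => (bStep m kv).getD c 0) =
        kv.2.2.map (fun c => (od.foldl bStep (bStep m kv)).getD c 0) := by
      apply List.map_congr_left
      intro c hc
      rw [hM c (foldl_bMark_contains_mem kv.2.2 hc)]
    rw [← hM _ hkeyc, hmapc]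

-- the bMark fold IS the enumerate-style dict: its items are the seen-keys list labeled 1,2,…
theorem foldl_bMark_items (l : List (Int × Int)) (m : PySem.Dict (Int × Int) Int)
    (h : m.items = (PySem.List.enumerate m.keys 1).map (fun p => (p.2, p.1))) :
    (l.foldl bMark m).items =
      (PySem.List.enumerate (PySem.Set.update m.keys l) 1).map (fun p => (p.2, p.1)) := by
  induction l generalizing m with
  | nil => simpa using h
  | cons c l ih =>
    simp only [List.foldl_cons, PySem.Set.update_cons]
    rcases hc : m.contains c with _ | _
    · -- fresh key: items append, keys append, enumerate splits off the last label
      have hadd : PySem.Set.add m.keys c = m.keys ++ [c] := by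
        apply PySem.Set.add_of_not_mem
        intro hmem
        rw [(PySem.Dict.contains_iff_mem_keys m c).mpr hmem] at hc
        cases hc
      have hsz : m.size = m.keys.length := by
        have : m.items.length = ((PySem.List.enumerate m.keys 1).map (fun p => (p.2, p.1))).length := by rw [h]
        simpa [PySem.Dict.size, PySem.List.length_enumerate] using this
      have hstep : (bMark m c).items =
          (PySem.List.enumerate (PySem.Set.add m.keys c) 1).map (fun p => (p.2, p.1)) := by
        unfold bMark
        rw [hc]
        simp only [Bool.false_eq_true, if_false]
        rw [PySem.Dict.items_insert_of_not_contains m _ hc, hadd,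
            PySem.List.enumerate_append, List.map_append, h]
        simp [PySem.List.enumerate_cons, hsz]
        omega
      have hkeys : (bMark m c).keys = PySem.Set.add m.keys c := by
        unfold bMark
        rw [hc]
        simp only [Bool.false_eq_true, if_false]
        rw [PySem.Dict.keys_insert_of_not_contains m _ hc, hadd]
      have := ih (bMark m c) (by rw [hstep, hkeys])
      rwa [hkeys] at this
    · -- seen key: nothing changes, and add is a no-op on the keys
      have hadd : PySem.Set.add m.keys c = m.keys :=
        PySem.Set.add_of_mem ((PySem.Dict.contains_iff_mem_keys m c).mp hc)
      have hb : bMark m c = m := by unfold bMark; rw [hc]; simp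
      rw [hb, hadd]
      exact ih m h

-- B's enumerate-built dict equals the bMark fold over the stream
theorem enumDict_eq (l : List (Int × Int)) :
    (PySem.List.enumerate (PySem.List.dedup l) 1).foldl
        (fun d p => d.insert p.2 p.1) (PySem.Dict.empty : PySem.Dict (Int × Int) Int)
      = l.foldl bMark PySem.Dict.empty := by
  apply PySem.Dict.ext
  have hfresh : ((PySem.List.enumerate (PySem.List.dedup l) 1).foldl
      (fun d p => d.insert p.2 p.1) (PySem.Dict.empty : PySem.Dict (Int × Int) Int)).items
      = (PySem.List.enumerate (PySem.List.dedup l) 1).map (fun p => (p.2, p.1)) := by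
    have h1 : ∀ a ∈ PySem.List.enumerate (PySem.List.dedup l) 1,
        (PySem.Dict.empty : PySem.Dict (Int × Int) Int).contains a.2 = false := by
      intro a _; simp [PySem.Dict.contains_empty]
    have h2 : ((PySem.List.enumerate (PySem.List.dedup l) 1).map (fun p => p.2)).Nodup := by
      rw [PySem.List.map_snd_enumerate]; exact PySem.List.nodup_dedup l
    have := PySem.Dict.items_foldl_insert_fresh
      (l := PySem.List.enumerate (PySem.List.dedup l) 1)
      (k := fun p => p.2) (v := fun p => p.1)
      (d := (PySem.Dict.empty : PySem.Dict (Int × Int) Int)) h1 h2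
    simpa [PySem.Dict.items] using this
  rw [hfresh,
      foldl_bMark_items l PySem.Dict.empty (by simp [PySem.Dict.keys, PySem.Dict.empty, PySem.List.enumerate_nil])]
  simp [PySem.Dict.keys, PySem.Dict.empty, PySem.Set.update_nil_left]

-- the stream fold followed by bMark labeling equals the per-entry bStep fold
theorem stream_fold_eq (od : List (Int × Int × List (Int × Int)))
    (s0 : List (Int × Int)) (m : PySem.Dict (Int × Int) Int) :
    ((od.foldl (fun s kv => s ++ (kv.1, kv.2.1) :: kv.2.2) s0).foldl bMark m) =
      od.foldl bStep (s0.foldl bMark m) := by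
  induction od generalizing s0 m with
  | nil => rfl
  | cons kv od ih =>
    simp only [List.foldl_cons]
    rw [ih]
    congr 1
    rw [List.foldl_append]
    rfl

-- ===== VERDICT (by name: the statement is the Claim_ definition above) =====
theorem transofrm_dict_int_spec : Claim_equal_transofrm_dict_int := by
  intro od node _
  simp only [Spec_transofrm_dict_int, transofrm_dict_int, transofrm_dict_int_alt]
  rw [enumDict_eq, stream_fold_eq]
  have h := main_eq od PySem.Dict.empty PySem.Dict.empty
  simp only [PySem.Dict.size_empty, Nat.cast_zero, zero_add] at h
  rw [h]
  rfl
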